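-- pv_equiv track=rewrite | github.com/ekuns/AdventOfCode | 2015/day20.py | sieve2
-- ===== SOURCE A (Python) =====
-- def sieve2(target):
--     target //= 11
--     giftcount = [0] * target
--     for i in range(1, target):
--         toadd = i * 11
--         for j in range(i, min(i*50+1, target), i):
--             giftcount[j] += toadd
--     return giftcount
-- ===== SOURCE B (Python) =====
-- def sieve2(target):
--     target //= 11
--     return [11 * sum(j // k for k in range(1, 51) if j % k == 0)
--             for j in range(target)]
-- ===== Notes on version B (the rewrite author's own statement) =====
-- stated objective: alternative
-- what changed: Replaces the per-elf scatter sieve that mutates a shared gift-count array with a per-house gather: each house value is computed directly as a sum over that house's capped divisors, so no array mutation or nested index update remains.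
import Mathlib
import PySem

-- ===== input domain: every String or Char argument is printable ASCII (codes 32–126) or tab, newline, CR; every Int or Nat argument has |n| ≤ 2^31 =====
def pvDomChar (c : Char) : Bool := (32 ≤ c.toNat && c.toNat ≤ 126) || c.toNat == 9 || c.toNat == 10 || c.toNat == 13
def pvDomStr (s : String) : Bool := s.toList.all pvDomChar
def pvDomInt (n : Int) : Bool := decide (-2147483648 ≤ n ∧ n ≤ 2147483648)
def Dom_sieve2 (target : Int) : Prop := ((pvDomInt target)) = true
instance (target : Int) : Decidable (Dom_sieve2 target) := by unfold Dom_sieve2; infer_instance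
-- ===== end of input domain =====

-- B replaces A's per-elf scatter over a mutated array by a per-house gather: each
-- house value is computed directly as a sum over that house's capped divisors
-- (objective: alternative decomposition, same asymptotic cost).

-- ===== PORT A =====
def sieve2 (target : Int) : List Int :=
  let t := PySem.Int.floordiv target 11
  let giftcount := List.replicate t.toNat (0 : Int)
  (PySem.List.pyRange 1 t 1).foldl
    (fun gc i =>
      let toadd := i * 11
      (PySem.List.pyRange i (min (i * 50 + 1) t) i).foldl
        (fun gc2 j => PySem.List.pySetD gc2 j (PySem.List.pyGetD gc2 j 0 + toadd)) gc)
    giftcount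

-- ===== PORT B =====
def sieve2_alt (target : Int) : List Int :=
  let t := PySem.Int.floordiv target 11
  (PySem.List.pyRange 0 t 1).map (fun j =>
    11 * ((PySem.List.pyRange 1 51 1).foldl
      (fun s k => if PySem.Int.mod j k = 0 then s + PySem.Int.floordiv j k else s) 0))

-- ===== PRECONDITION & SPEC =====
def Spec_sieve2 (target : Int) (out : List Int) : Prop := out = sieve2_alt target
instance (target : Int) (out : List Int) : Decidable (Spec_sieve2 target out) := by unfold Spec_sieve2; infer_instance

-- ===== CLAIM (what is proved, stated in full; the proofs are below) =====
def Claim_equal_sieve2 : Prop := ∀ (target : Int), Dom_sieve2 target → Spec_sieve2 target (sieve2 target)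

-- ===== LEMMAS AND PROOFS =====

-- A's inner loop body, abbreviated for the lemmas below.
def pvInner (v : Int) (gc2 : List Int) (j : Int) : List Int :=
  PySem.List.pySetD gc2 j (PySem.List.pyGetD gc2 j 0 + v)

-- A's outer loop body.
def pvOuter (t : Int) (gc : List Int) (i : Int) : List Int :=
  (PySem.List.pyRange i (min (i * 50 + 1) t) i).foldl (pvInner (i * 11)) gc

lemma pvInner_foldl_length (v : Int) (L : List Int) (gc : List Int) :
    (L.foldl (pvInner v) gc).length = gc.length := by
  induction L generalizing gc with
  | nil => rfl
  | cons j L ih => simp [List.foldl, ih, pvInner]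

lemma pvInner_foldl_get (v : Int) (L : List Int) (gc : List Int) (q : ℕ)
    (hq : q < gc.length) (hL : ∀ j ∈ L, 0 ≤ j ∧ j < (gc.length : Int)) :
    PySem.List.pyGetD (L.foldl (pvInner v) gc) (q : Int) 0
      = PySem.List.pyGetD gc (q : Int) 0 + v * (L.count (q : Int)) := by
  induction L generalizing gc with
  | nil => simp
  | cons j L ih =>
    obtain ⟨hj0, hjlen⟩ := hL j (by simp)
    obtain ⟨n, rfl⟩ : ∃ n : ℕ, j = (n : Int) := ⟨j.toNat, (Int.toNat_of_nonneg hj0).symm⟩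
    have hn : n < gc.length := by exact_mod_cast hjlen
    have hlen' : (pvInner v gc (n : Int)).length = gc.length := by
      simp [pvInner]
    have hL' : ∀ x ∈ L, 0 ≤ x ∧ x < ((pvInner v gc (n : Int)).length : Int) := by
      intro x hx; rw [hlen']; exact hL x (by simp [hx])
    have hrec := ih (pvInner v gc (n : Int)) (by omega) hL'
    rw [List.foldl_cons, hrec, List.count_cons]
    simp only [pvInner]
    rw [PySem.List.pyGetD_pySetD_natCast gc n q _ 0 hn]
    by_cases h : q = n
    · subst h; simp; ring
    · have hne : ((n : Int) == (q : Int)) = false := by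
        simp only [beq_eq_false_iff_ne, ne_eq, Int.natCast_inj]; omega
      simp [h, hne]

lemma pvOuter_foldl_length (t : Int) (O : List Int) (gc : List Int) :
    (O.foldl (pvOuter t) gc).length = gc.length := by
  induction O generalizing gc with
  | nil => rfl
  | cons i O ih => rw [List.foldl_cons, ih, pvOuter, pvInner_foldl_length]

lemma pvOuter_foldl_get (t : Int) (O : List Int) (gc : List Int) (q : ℕ)
    (hlen : (gc.length : Int) = t) (hq : q < gc.length) (hO : ∀ i ∈ O, 1 ≤ i) :
    PySem.List.pyGetD (O.foldl (pvOuter t) gc) (q : Int) 0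
      = PySem.List.pyGetD gc (q : Int) 0
        + (O.map (fun i => i * 11 *
            ((PySem.List.pyRange i (min (i * 50 + 1) t) i).count (q : Int) : Int))).sum := by
  induction O generalizing gc with
  | nil => simp
  | cons i O ih =>
    have hi : 1 ≤ i := hO i (by simp)
    have hmem : ∀ j ∈ PySem.List.pyRange i (min (i * 50 + 1) t) i, 0 ≤ j ∧ j < (gc.length : Int) := by
      intro j hj
      rw [PySem.List.mem_pyRange_iff_of_pos (by omega)] at hj
      refine ⟨by omega, ?_⟩
      have : j < min (i * 50 + 1) t := hj.2.1
      omega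
    have hlen1 : (pvOuter t gc i).length = gc.length := by
      rw [pvOuter, pvInner_foldl_length]
    rw [List.foldl_cons, ih (pvOuter t gc i) (by rw [hlen1]; exact hlen) (by omega)
      (fun x hx => hO x (by simp [hx]))]
    rw [show pvOuter t gc i = (PySem.List.pyRange i (min (i * 50 + 1) t) i).foldl (pvInner (i * 11)) gc from rfl]
    rw [pvInner_foldl_get (i * 11) _ gc q hq hmem]
    simp only [List.map_cons, List.sum_cons]
    ring

-- the multiples list hits q at most once; characterise the count
lemma pvCount_inner (t i : Int) (q : ℕ) (hi : 1 ≤ i) (hq : (q : Int) < t) :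
    ((PySem.List.pyRange i (min (i * 50 + 1) t) i).count (q : Int) : Int)
      = if i ∣ (q : Int) ∧ i ≤ (q : Int) ∧ (q : Int) ≤ 50 * i then 1 else 0 := by
  have hnd : (PySem.List.pyRange i (min (i * 50 + 1) t) i).Nodup := by
    rw [PySem.List.pyRange_of_pos _ _ (by omega : (0:Int) < i)]
    exact (List.nodup_range).map (fun a b h => by
      have : i * (a : Int) = i * (b : Int) := by omega
      have := mul_left_cancel₀ (by omega : i ≠ 0) this
      exact_mod_cast this)
  have hmem : (q : Int) ∈ PySem.List.pyRange i (min (i * 50 + 1) t) i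
      ↔ (i ∣ (q : Int) ∧ i ≤ (q : Int) ∧ (q : Int) ≤ 50 * i) := by
    rw [PySem.List.mem_pyRange_iff_of_pos (by omega), dvd_sub_self_right]
    constructor
    · rintro ⟨h1, h2, h3⟩; exact ⟨h3, h1, by omega⟩
    · rintro ⟨h1, h2, h3⟩; exact ⟨h2, by omega, h1⟩
  by_cases h : i ∣ (q : Int) ∧ i ≤ (q : Int) ∧ (q : Int) ≤ 50 * i
  · rw [if_pos h]
    exact_mod_cast List.count_eq_one_of_mem hnd (hmem.mpr h)
  · rw [if_neg h]
    exact_mod_cast List.count_eq_zero_of_not_mem (fun hc => h (hmem.mp hc))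

-- B's generator-sum loop as a sum with a conditional term
lemma pvFoldl_ite_add (p : Int → Prop) [DecidablePred p] (g : Int → Int) (L : List Int) (s : Int) :
    L.foldl (fun s k => if p k then s + g k else s) s
      = s + (L.map (fun k => if p k then g k else 0)).sum := by
  induction L generalizing s with
  | nil => simp
  | cons k L ih =>
    rw [List.foldl_cons, ih]
    by_cases h : p k
    · simp only [if_pos h, List.map_cons, List.sum_cons]; ring
    · simp [h]

-- sum over pyRange a b 1 as a Finset.Icc sum
lemma pvSum_pyRange (a b : Int) (f : Int → Int) :
    ((PySem.List.pyRange a b 1).map f).sum = ∑ i ∈ Finset.Icc a (b - 1), f i := by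
  rw [PySem.List.pyRange_one, List.map_map]
  have h1 : ((List.range (b - a).toNat).map (f ∘ fun (k : ℕ) => a + (k : Int))).sum
      = ∑ k ∈ Finset.range (b - a).toNat, f (a + (k : Int)) := rfl
  rw [h1]
  refine Finset.sum_nbij' (i := fun (k : ℕ) => a + (k : Int)) (j := fun x => (x - a).toNat) ?_ ?_ ?_ ?_ ?_
  · intro k hk; simp at hk ⊢; omega
  · intro x hx; simp at hx ⊢; omega
  · intro k hk; simp
  · intro x hx; simp at hx ⊢; omega
  · intro k hk; rfl

-- the divisor-pair bijection: A's per-house contribution sum equals B's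
lemma pvKey (t : Int) (q : ℕ) (hq : (q : Int) < t) :
    ((PySem.List.pyRange 1 t 1).map (fun i => i * 11 *
        ((PySem.List.pyRange i (min (i * 50 + 1) t) i).count (q : Int) : Int))).sum
      = 11 * ((PySem.List.pyRange 1 51 1).map
          (fun k => if k ∣ (q : Int) then (q : Int) / k else 0)).sum := by
  rw [pvSum_pyRange, pvSum_pyRange, Finset.mul_sum]
  have hL : ∑ i ∈ Finset.Icc (1:Int) (t - 1), i * 11 *
        ((PySem.List.pyRange i (min (i * 50 + 1) t) i).count (q : Int) : Int)
      = ∑ i ∈ Finset.Icc (1:Int) (t - 1),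
          (if i ∣ (q : Int) ∧ i ≤ (q : Int) ∧ (q : Int) ≤ 50 * i then i * 11 else 0) := by
    refine Finset.sum_congr rfl ?_
    intro i hi
    rw [Finset.mem_Icc] at hi
    rw [pvCount_inner t i q hi.1 hq]
    by_cases h : i ∣ (q : Int) ∧ i ≤ (q : Int) ∧ (q : Int) ≤ 50 * i <;> simp [h]
  have hR : ∀ k : Int, 11 * (if k ∣ (q : Int) then (q : Int) / k else 0)
      = if k ∣ (q : Int) then 11 * ((q : Int) / k) else 0 := by
    intro k; by_cases h : k ∣ (q : Int) <;> simp [h]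
  rw [hL]
  simp only [hR]
  rw [← Finset.sum_filter, ← Finset.sum_filter]
  by_cases hq0 : (q : Int) = 0
  · rw [Finset.sum_eq_zero, Finset.sum_eq_zero]
    · intro k hk
      rw [Finset.mem_filter, Finset.mem_Icc] at hk
      rw [hq0, Int.zero_ediv, mul_zero]
    · intro i hi
      rw [Finset.mem_filter, Finset.mem_Icc] at hi
      omega
  · have hqpos : 0 < (q : Int) := by omega
    refine Finset.sum_nbij' (i := fun i => (q : Int) / i) (j := fun k => (q : Int) / k)
      ?_ ?_ ?_ ?_ ?_
    · -- forward membership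
      intro a ha
      dsimp only
      rw [Finset.mem_filter, Finset.mem_Icc] at ha
      obtain ⟨⟨ha1, hat⟩, ⟨m, hm⟩, haq, ha50⟩ := ha
      have ha0 : a ≠ 0 := by omega
      have hdiv : (q : Int) / a = m := by rw [hm, Int.mul_ediv_cancel_left _ ha0]
      rw [Finset.mem_filter, Finset.mem_Icc, hdiv]
      have hm1 : 1 ≤ m := by nlinarith
      have hm50 : m ≤ 50 := by nlinarith
      exact ⟨⟨hm1, hm50⟩, ⟨a, by rw [hm]; ring⟩⟩
    · -- backward membership
      intro k hk
      dsimp only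
      rw [Finset.mem_filter, Finset.mem_Icc] at hk
      obtain ⟨⟨hk1, hk50⟩, ⟨m, hm⟩⟩ := hk
      have hk0 : k ≠ 0 := by omega
      have hdiv : (q : Int) / k = m := by rw [hm, Int.mul_ediv_cancel_left _ hk0]
      rw [Finset.mem_filter, Finset.mem_Icc, hdiv]
      have hm1 : 1 ≤ m := by nlinarith
      refine ⟨⟨hm1, by nlinarith⟩, ⟨k, by rw [hm]; ring⟩, by nlinarith, by nlinarith⟩
    · -- left inverse
      intro a ha
      dsimp only
      rw [Finset.mem_filter, Finset.mem_Icc] at ha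
      obtain ⟨⟨ha1, hat⟩, ⟨m, hm⟩, haq, ha50⟩ := ha
      have ha0 : a ≠ 0 := by omega
      have hdiv : (q : Int) / a = m := by rw [hm, Int.mul_ediv_cancel_left _ ha0]
      have hm1 : 1 ≤ m := by nlinarith
      have h2 : (q : Int) / m = a := by rw [hm]; exact Int.mul_ediv_cancel _ (by omega)
      rw [hdiv, h2]
    · -- right inverse
      intro k hk
      dsimp only
      rw [Finset.mem_filter, Finset.mem_Icc] at hk
      obtain ⟨⟨hk1, hk50⟩, ⟨m, hm⟩⟩ := hk
      have hk0 : k ≠ 0 := by omega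
      have hdiv : (q : Int) / k = m := by rw [hm, Int.mul_ediv_cancel_left _ hk0]
      have hm1 : 1 ≤ m := by nlinarith
      have h2 : (q : Int) / m = k := by rw [hm]; exact Int.mul_ediv_cancel _ (by omega)
      rw [hdiv, h2]
    · -- values agree
      intro a ha
      dsimp only
      rw [Finset.mem_filter, Finset.mem_Icc] at ha
      obtain ⟨⟨ha1, hat⟩, ⟨m, hm⟩, haq, ha50⟩ := ha
      have ha0 : a ≠ 0 := by omega
      have hdiv : (q : Int) / a = m := by rw [hm, Int.mul_ediv_cancel_left _ ha0]
      have hm1 : 1 ≤ m := by nlinarith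
      have h2 : (q : Int) / m = a := by rw [hm]; exact Int.mul_ediv_cancel _ (by omega)
      rw [hdiv, h2]
      ring

-- ===== VERDICT (by name: the statement is the Claim_ definition above) =====
theorem sieve2_spec : Claim_equal_sieve2 := by
  intro target _
  unfold Spec_sieve2
  have hA : sieve2 target
      = (PySem.List.pyRange 1 (PySem.Int.floordiv target 11) 1).foldl
          (pvOuter (PySem.Int.floordiv target 11))
          (List.replicate (PySem.Int.floordiv target 11).toNat 0) := rfl
  set t := PySem.Int.floordiv target 11 with ht
  by_cases h0 : t ≤ 0
  · rw [hA, PySem.List.pyRange_one_eq_nil (by omega : t ≤ 1)]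
    show List.replicate t.toNat (0:Int) = sieve2_alt target
    rw [show sieve2_alt target
        = (PySem.List.pyRange 0 t 1).map _ from rfl,
      PySem.List.pyRange_one_eq_nil (by omega : t ≤ 0)]
    simp [Int.toNat_of_nonpos h0]
  · replace h0 : 0 < t := by omega
    have hlenA : (sieve2 target).length = t.toNat := by
      rw [hA, pvOuter_foldl_length, List.length_replicate]
    have hlenB : (sieve2_alt target).length = t.toNat := by
      rw [show sieve2_alt target = (PySem.List.pyRange 0 t 1).map _ from rfl,
        List.length_map, PySem.List.length_pyRange_one]
      norm_num
    apply List.ext_getElem (by rw [hlenA, hlenB])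
    intro n hn1 hn2
    have hnt : n < t.toNat := by omega
    have hqt : (n : Int) < t := by omega
    -- left side
    have hget := pvOuter_foldl_get t (PySem.List.pyRange 1 t 1)
      (List.replicate t.toNat 0) n
      (by rw [List.length_replicate]; omega)
      (by rw [List.length_replicate]; exact hnt)
      (fun i hi => (PySem.List.mem_pyRange_one.mp hi).1)
    have hLeft : (sieve2 target)[n]
        = PySem.List.pyGetD (sieve2 target) (n : Int) 0 := by
      rw [PySem.List.pyGetD_eq_getElem _ _ (by omega) (by rw [hlenA]; omega)]
      simp
    rw [hLeft, hA, hget, PySem.List.pyGetD_natCast, List.getD_eq_getElem _ _ (by simpa using hnt),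
      List.getElem_replicate, pvKey t n hqt, zero_add]
    -- right side
    have hBdef : sieve2_alt target = (PySem.List.pyRange 0 t 1).map
        (fun j => 11 * ((PySem.List.pyRange 1 51 1).foldl
          (fun s k => if PySem.Int.mod j k = 0 then s + PySem.Int.floordiv j k else s) 0)) := rfl
    rw [List.getElem_of_eq hBdef]
    rw [List.getElem_map, PySem.List.getElem_pyRange_one 0 t n (by simpa using hnt)]
    rw [zero_add, pvFoldl_ite_add (fun k => PySem.Int.mod (n : Int) k = 0)
      (fun k => PySem.Int.floordiv (n : Int) k) _ 0, zero_add]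
    congr 1
    refine congrArg List.sum (List.map_congr_left ?_)
    intro k hk
    have hk1 : 1 ≤ k := (PySem.List.mem_pyRange_one.mp hk).1
    rw [PySem.Int.floordiv_eq_ediv_of_pos (by omega : (0:Int) < k)]
    simp only [PySem.Int.mod_eq_zero_iff_dvd]
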